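-- pv_equiv track=rewrite | github.com/singularis/chater_new | chater_ui/gphoto.py | _rewrite_html_for_proxy
-- ===== SOURCE A (Python) =====
-- def _rewrite_html_for_proxy(html_text: str) -> str:
--     """
--     Rewrite common resource URLs in HTML to go through our proxy endpoint so the
--     browser doesn't try to fetch them from our Flask app root.
--     """
--     if not html_text:
--         return html_text
--
--     replacements = [
--         ('src="/', 'src="/gphoto_proxy/'),
--         ("src='/", "src='/gphoto_proxy/"),
--         ('href="/', 'href="/gphoto_proxy/'),
--         ("href='/", "href='/gphoto_proxy/"),
--         ("srcset=\"/", "srcset=\"/gphoto_proxy/"),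
--         ("srcset='/", "srcset='/gphoto_proxy/"),
--         ("url(/", "url(/gphoto_proxy/"),  # CSS url() refs
--     ]
--
--     rewritten = html_text
--     for src, dst in replacements:
--         rewritten = rewritten.replace(src, dst)
--     return rewritten
-- ===== SOURCE B (Python) =====
-- def _rewrite_html_for_proxy(html_text: str) -> str:
--     """
--     Rewrite common resource URLs in HTML to go through our proxy endpoint,
--     in a single left-to-right scan instead of seven replace passes.
--     """
--     if not html_text:
--         return html_text
--
--     prefixes = ('src="/', "src='/", 'href="/', "href='/",
--                 'srcset="/', "srcset='/", "url(/")
--     out = []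
--     i = 0
--     n = len(html_text)
--     while i < n:
--         for p in prefixes:
--             if html_text.startswith(p, i):
--                 out.append(p + "gphoto_proxy/")
--                 i += len(p)
--                 break
--         else:
--             out.append(html_text[i])
--             i += 1
--     return "".join(out)
-- ===== Notes on version B (the rewrite author's own statement) =====
-- stated objective: alternative
-- what changed: Replaces the seven sequential str.replace passes, each of which rescans the whole string, with a single left-to-right scan that tries the seven literal prefixes at each position and splices the proxy segment in place.
import Mathlib
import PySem

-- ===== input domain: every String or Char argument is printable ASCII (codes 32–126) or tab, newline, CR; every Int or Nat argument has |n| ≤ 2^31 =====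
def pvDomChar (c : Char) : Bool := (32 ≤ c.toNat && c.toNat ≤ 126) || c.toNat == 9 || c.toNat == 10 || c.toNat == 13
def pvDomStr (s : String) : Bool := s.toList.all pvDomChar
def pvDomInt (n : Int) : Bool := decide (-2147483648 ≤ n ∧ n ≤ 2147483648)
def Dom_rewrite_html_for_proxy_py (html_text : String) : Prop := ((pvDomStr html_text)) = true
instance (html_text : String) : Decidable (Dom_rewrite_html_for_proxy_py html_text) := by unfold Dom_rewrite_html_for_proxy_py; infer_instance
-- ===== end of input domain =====

-- B replaces A's seven sequential str.replace passes by one left-to-right scan; equal output, no speed claim.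

-- ===== PORT A =====
-- the seven (src, dst) replacement pairs of A, in A's order
def pvReplacements : List (String × String) :=
  [("src=\"/", "src=\"/gphoto_proxy/"),
   ("src='/", "src='/gphoto_proxy/"),
   ("href=\"/", "href=\"/gphoto_proxy/"),
   ("href='/", "href='/gphoto_proxy/"),
   ("srcset=\"/", "srcset=\"/gphoto_proxy/"),
   ("srcset='/", "srcset='/gphoto_proxy/"),
   ("url(/", "url(/gphoto_proxy/")]

def rewrite_html_for_proxy_py (html_text : String) : String :=
  if html_text = "" then html_text
  else pvReplacements.foldl (fun rewritten sd => PySem.Str.replace rewritten sd.1 sd.2) html_text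

-- ===== PORT B =====
-- the seven literal prefixes, in Source B's tuple order
def pvPats : List (List Char) :=
  ["src=\"/".toList, "src='/".toList, "href=\"/".toList, "href='/".toList,
   "srcset=\"/".toList, "srcset='/".toList, "url(/".toList]

def pvIns : List Char := "gphoto_proxy/".toList

-- Source B's while-loop: at each position try the prefixes in order (the inner for/break = find?),
-- emit prefix + "gphoto_proxy/" and skip past it, else copy one character
def pvScan : List Char → List Char
  | [] => []
  | c :: rest =>
    match pvPats.find? (fun p => p.isPrefixOf (c :: rest)) with
    | some p => p ++ pvIns ++ pvScan (rest.drop (p.length - 1))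
    | none => c :: pvScan rest
termination_by l => l.length
decreasing_by
  · simp only [List.length_cons, List.length_drop]; omega
  · simp

def rewrite_html_for_proxy_py_alt (html_text : String) : String :=
  if html_text = "" then html_text
  else String.ofList (pvScan html_text.toList)

-- ===== PRECONDITION & SPEC =====
def Spec_rewrite_html_for_proxy_py (html_text : String) (out : String) : Prop := out = rewrite_html_for_proxy_py_alt html_text
instance (html_text : String) (out : String) : Decidable (Spec_rewrite_html_for_proxy_py html_text out) := by unfold Spec_rewrite_html_for_proxy_py; infer_instance

-- ===== CLAIM (what is proved, stated in full; the proofs are below) =====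
def Claim_equal_rewrite_html_for_proxy_py : Prop := ∀ (html_text : String), Dom_rewrite_html_for_proxy_py html_text → Spec_rewrite_html_for_proxy_py html_text (rewrite_html_for_proxy_py html_text)

-- ===== LEMMAS AND PROOFS =====

-- one replace pass of Python's s.replace(q, q ++ ins) at the character level
def pvRepl (q : List Char) : List Char → List Char
  | [] => []
  | c :: rest =>
    if q.isPrefixOf (c :: rest) then (q ++ pvIns) ++ pvRepl q (rest.drop (q.length - 1))
    else c :: pvRepl q rest
termination_by l => l.length
decreasing_by
  · simp only [List.length_cons, List.length_drop]; omega
  · simp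

-- A's seven passes, composed left to right
def pvApply (ps : List (List Char)) (l : List Char) : List Char :=
  ps.foldl (fun s q => pvRepl q s) l

-- q matches nowhere starting inside u, for every continuation after u
def pvNoMatch (q u : List Char) : Prop :=
  ∀ k, k < u.length →
    (if q.length ≤ u.length - k then ¬ q.isPrefixOf (u.drop k) = true
     else ¬ (u.drop k).isPrefixOf q = true)

-- all nonempty suffixes of the patterns (closed under nonempty tails)
def pvG : List (List Char) := pvPats.flatMap (fun p => p.tails.filter (fun t => !t.isEmpty))

-- finite facts about the pattern set ------------------------------------

theorem pvG_facts : ∀ r ∈ pvG, r ≠ [] ∧ (r.tail = [] ∨ r.tail ∈ pvG) := by decide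
theorem pvPats_sub_G : ∀ p ∈ pvPats, p ∈ pvG := by decide
theorem pvPats_nonempty : ∀ p ∈ pvPats, p ≠ [] := by decide
theorem pvPats_nodup : pvPats.Nodup := by decide
theorem pv_fact_long : ∀ r ∈ pvG, ∀ q ∈ pvPats, q.length < r.length → ¬ q.isPrefixOf r = true := by decide
theorem pv_fact_pats : ∀ p ∈ pvPats, ∀ q ∈ pvPats, q ≠ p → pvNoMatch q p := by unfold pvNoMatch; decide
theorem pv_fact_ins : ∀ p ∈ pvPats, ∀ q ∈ pvPats, q ≠ p → pvNoMatch q (p ++ pvIns) := by unfold pvNoMatch; decide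

-- prefix stability under one replace pass (PL) ---------------------------

-- pvRepl's match branch starts with q ++ pvIns; no member of pvG reaches past q there
theorem pv_prefix_repl_aux (q : List Char) (hq : q ∈ pvPats) :
    ∀ n ys r, ys.length ≤ n → r ∈ pvG → (r <+: pvRepl q ys ↔ r <+: ys) := by
  intro n
  induction n with
  | zero =>
    intro ys r hlen _
    have : ys = [] := List.length_eq_zero_iff.mp (Nat.le_zero.mp hlen)
    subst this; rw [pvRepl]
  | succ n IH =>
    intro ys r hlen hr
    cases ys with
    | nil => rw [pvRepl]
    | cons c rest =>
      by_cases hm : q.isPrefixOf (c :: rest) = true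
      · have hqpre : q <+: c :: rest := List.isPrefixOf_iff_prefix.mp hm
        obtain ⟨t, ht⟩ := hqpre
        have hqne : q ≠ [] := pvPats_nonempty q hq
        obtain ⟨qc, q', hq'⟩ := List.exists_cons_of_ne_nil hqne
        have hrest : rest = q' ++ t := by
          have h2 := ht; rw [hq'] at h2
          exact (List.cons_eq_cons.mp h2.symm).2
        have hdrop : rest.drop (q.length - 1) = t := by
          rw [hrest, hq']; simp
        rw [show pvRepl q (c :: rest) = (q ++ pvIns) ++ pvRepl q (rest.drop (q.length - 1)) from by
          rw [pvRepl]; simp [hm]]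
        rw [hdrop, ← ht]
        rcases Nat.lt_or_ge q.length r.length with hlt | hle
        ·
          have hbad : ∀ z : List Char, ¬ r <+: q ++ z := by
            intro z hcon
            have hqr : q <+: r :=
              List.prefix_of_prefix_length_le (List.prefix_append q z) hcon (Nat.le_of_lt hlt)
            exact pv_fact_long r hr q hq hlt (List.isPrefixOf_iff_prefix.mpr hqr)
          constructor
          · intro h; exact absurd (by rw [List.append_assoc] at h; exact h) (hbad _)
          · intro h; exact absurd h (hbad _)
        · constructor
          · intro h
            have h1 : r <+: q := by
              have := (List.isPrefix_append_of_length (l₂ := q) (l₁ := r)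
                (l₃ := pvIns ++ pvRepl q t) (by exact hle)).mp (by rw [List.append_assoc] at h; exact h)
              exact this
            exact h1.trans (List.prefix_append q t)
          · intro h
            have h1 : r <+: q := (List.isPrefix_append_of_length hle).mp h
            exact h1.trans (by rw [List.append_assoc]; exact List.prefix_append q (pvIns ++ pvRepl q t))
      · rw [show pvRepl q (c :: rest) = c :: pvRepl q rest from by rw [pvRepl]; simp [hm]]
        obtain ⟨hne, htail⟩ := pvG_facts r hr
        obtain ⟨a, r', hr'⟩ := List.exists_cons_of_ne_nil hne
        subst hr'
        rw [List.cons_prefix_cons, List.cons_prefix_cons]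
        cases r' with
        | nil => simp
        | cons b r'' =>
          have hr'' : (b :: r'') ∈ pvG := by
            rcases htail with h | h
            · exact absurd h (by simp)
            · simpa using h
          rw [IH rest (b :: r'') (by simpa using Nat.lt_succ_iff.mp (by simpa using hlen)) hr'']

theorem pv_prefix_repl (q : List Char) (hq : q ∈ pvPats) :
    ∀ ys r, r ∈ pvG → (r <+: pvRepl q ys ↔ r <+: ys) := fun ys r hr =>
  pv_prefix_repl_aux q hq ys.length ys r le_rfl hr

-- a pass walks through a region it cannot match in -----------------------

theorem pv_goThrough (q : List Char) :
    ∀ u t, pvNoMatch q u → pvRepl q (u ++ t) = u ++ pvRepl q t := by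
  intro u
  induction u with
  | nil => intro t _; simp
  | cons a u' IH =>
    intro t h
    have h0 := h 0 (by simp)
    have hnm : ¬ q.isPrefixOf ((a :: u') ++ t) = true := by
      intro hcon
      have hpre : q <+: (a :: u') ++ t := List.isPrefixOf_iff_prefix.mp hcon
      rcases Nat.lt_or_ge (a :: u').length q.length with hlt | hge
      · have hle : ¬ q.length ≤ (a :: u').length - 0 := by
          simp only [List.length_cons] at hlt ⊢; omega
        simp only [if_neg hle, List.drop_zero] at h0
        have : (a :: u') <+: q :=
          List.prefix_of_prefix_length_le (List.prefix_append _ _) hpre (Nat.le_of_lt hlt)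
        exact h0 (List.isPrefixOf_iff_prefix.mpr this)
      · have hle : q.length ≤ (a :: u').length - 0 := by simpa using hge
        simp only [if_pos hle, List.drop_zero] at h0
        exact h0 (List.isPrefixOf_iff_prefix.mpr
          ((List.isPrefix_append_of_length (by simpa using hge)).mp hpre))
    have hstep : pvRepl q ((a :: u') ++ t) = a :: pvRepl q (u' ++ t) := by
      rw [List.cons_append, pvRepl]; simp [show ¬ q.isPrefixOf (a :: (u' ++ t)) = true from hnm]
    have hshift : pvNoMatch q u' := by
      intro k hk
      have := h (k + 1) (by simp; omega)
      simpa using this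
    rw [hstep, IH t hshift, List.cons_append]

-- fold lemmas ------------------------------------------------------------

theorem pv_apply_nomatch (ps : List (List Char)) (hps : ∀ q ∈ ps, q ∈ pvPats) :
    ∀ c rest, (∀ r ∈ pvPats, ¬ r <+: (c :: rest)) →
      pvApply ps (c :: rest) = c :: pvApply ps rest := by
  induction ps with
  | nil => intro c rest _; rfl
  | cons q ps IH =>
    intro c rest hno
    have hqmem : q ∈ pvPats := hps q (by simp)
    have hq1 : pvRepl q (c :: rest) = c :: pvRepl q rest := by
      rw [pvRepl]
      simp [show ¬ q.isPrefixOf (c :: rest) = true from fun hcon =>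
        hno q hqmem (List.isPrefixOf_iff_prefix.mp hcon)]
    have hno' : ∀ r ∈ pvPats, ¬ r <+: (c :: pvRepl q rest) := by
      intro r hr hcon
      rw [← hq1] at hcon
      exact hno r hr ((pv_prefix_repl q hqmem (c :: rest) r (pvPats_sub_G r hr)).mp hcon)
    show pvApply ps (pvRepl q (c :: rest)) = c :: pvApply ps (pvRepl q rest)
    rw [hq1]
    exact IH (fun x hx => hps x (by simp [hx])) c (pvRepl q rest) hno'

theorem pv_repl_match_head (q : List Char) (hq : q ≠ []) (x : List Char) :
    pvRepl q (q ++ x) = (q ++ pvIns) ++ pvRepl q x := by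
  obtain ⟨qc, q', hq'⟩ := List.exists_cons_of_ne_nil hq
  subst hq'
  rw [List.cons_append, pvRepl]
  simp [List.isPrefixOf_iff_prefix]

theorem pv_apply_through_pat (p : List Char) (hp : p ∈ pvPats) (ps : List (List Char))
    (hps : ∀ q ∈ ps, q ∈ pvPats ∧ q ≠ p) :
    ∀ t, pvApply ps (p ++ t) = p ++ pvApply ps t := by
  induction ps with
  | nil => intro t; rfl
  | cons q ps IH =>
    intro t
    obtain ⟨hqm, hqp⟩ := hps q (by simp)
    show pvApply ps (pvRepl q (p ++ t)) = p ++ pvApply ps (pvRepl q t)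
    rw [pv_goThrough q p t (pv_fact_pats p hp q hqm hqp)]
    exact IH (fun x hx => hps x (by simp [hx])) (pvRepl q t)

theorem pv_apply_through_ins (p : List Char) (hp : p ∈ pvPats) (ps : List (List Char))
    (hps : ∀ q ∈ ps, q ∈ pvPats ∧ q ≠ p) :
    ∀ t, pvApply ps (p ++ pvIns ++ t) = p ++ pvIns ++ pvApply ps t := by
  induction ps with
  | nil => intro t; rfl
  | cons q ps IH =>
    intro t
    obtain ⟨hqm, hqp⟩ := hps q (by simp)
    show pvApply ps (pvRepl q (p ++ pvIns ++ t)) = p ++ pvIns ++ pvApply ps (pvRepl q t)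
    rw [pv_goThrough q (p ++ pvIns) t (pv_fact_ins p hp q hqm hqp)]
    exact IH (fun x hx => hps x (by simp [hx])) (pvRepl q t)

-- main equivalence at the character level ---------------------------------

theorem pv_apply_nil (ps : List (List Char)) : pvApply ps [] = [] := by
  induction ps with
  | nil => rfl
  | cons q ps IH => show pvApply ps (pvRepl q []) = []; rw [show pvRepl q [] = [] from by rw [pvRepl]]; exact IH

theorem pv_main_aux : ∀ n l, l.length ≤ n → pvApply pvPats l = pvScan l := by
  intro n
  induction n with
  | zero =>
    intro l hl
    have : l = [] := List.length_eq_zero_iff.mp (Nat.le_zero.mp hl)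
    subst this; rw [pvScan]; exact pv_apply_nil _
  | succ n IH =>
    intro l hl
    cases l with
    | nil => rw [pvScan]; exact pv_apply_nil _
    | cons c rest =>
      cases hf : pvPats.find? (fun p => p.isPrefixOf (c :: rest)) with
      | none =>
        have hno : ∀ r ∈ pvPats, ¬ r <+: (c :: rest) := by
          intro r hr hcon
          exact (List.find?_eq_none.mp hf r hr) (List.isPrefixOf_iff_prefix.mpr hcon)
        rw [pv_apply_nomatch pvPats (fun q h => h) c rest hno,
            IH rest (by simpa using Nat.lt_succ_iff.mp (by simpa using hl)), pvScan, hf]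
      | some p =>
        obtain ⟨hpp, l₁, l₂, hsplit, hprior⟩ := List.find?_eq_some_iff_append.mp hf
        have hp : p ∈ pvPats := List.mem_of_find?_eq_some hf
        have hpre : p <+: c :: rest := List.isPrefixOf_iff_prefix.mp hpp
        obtain ⟨t, ht⟩ := hpre
        have hpne : p ≠ [] := pvPats_nonempty p hp
        obtain ⟨pc, p', hp'⟩ := List.exists_cons_of_ne_nil hpne
        have hrest : rest = p' ++ t := by
          have h2 := ht; rw [hp'] at h2
          exact ((List.cons_eq_cons.mp h2).2).symm
        have hdrop : rest.drop (p.length - 1) = t := by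
          rw [hrest, hp']; simp
        -- memberships/inequalities for the two halves
        have hmem1 : ∀ q ∈ l₁, q ∈ pvPats ∧ q ≠ p := by
          intro q hq
          refine ⟨by rw [hsplit]; exact List.mem_append_left _ hq, ?_⟩
          intro he
          have := hprior q hq
          rw [he] at this; simp [hpp] at this
        have hmem2 : ∀ q ∈ l₂, q ∈ pvPats ∧ q ≠ p := by
          intro q hq
          refine ⟨by rw [hsplit]; exact List.mem_append_right _ (by simp [hq]), ?_⟩
          intro he
          subst he
          have hnd := pvPats_nodup
          rw [hsplit] at hnd
          have := List.Nodup.of_append_right hnd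
          rw [List.nodup_cons] at this
          exact this.1 hq
        have htlen : t.length ≤ n := by
          have : (c :: rest).length = p.length + t.length := by rw [← ht]; simp
          simp only [List.length_cons] at this hl
          have hp1 : 1 ≤ p.length := by rw [hp']; simp
          omega
        calc pvApply pvPats (c :: rest)
            = pvApply (l₁ ++ p :: l₂) (p ++ t) := by rw [← hsplit, ← ht]
          _ = pvApply (p :: l₂) (pvApply l₁ (p ++ t)) := by
              unfold pvApply; rw [List.foldl_append]
          _ = pvApply (p :: l₂) (p ++ pvApply l₁ t) := by
              rw [pv_apply_through_pat p hp l₁ hmem1 t]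
          _ = pvApply l₂ ((p ++ pvIns) ++ pvRepl p (pvApply l₁ t)) := by
              show pvApply l₂ (pvRepl p (p ++ pvApply l₁ t)) = _
              rw [pv_repl_match_head p hpne]
          _ = p ++ pvIns ++ pvApply l₂ (pvRepl p (pvApply l₁ t)) :=
              pv_apply_through_ins p hp l₂ hmem2 (pvRepl p (pvApply l₁ t))
          _ = p ++ pvIns ++ pvApply pvPats t := by
              rw [hsplit]
              unfold pvApply
              rw [List.foldl_append]
              rfl
          _ = p ++ pvIns ++ pvScan t := by rw [IH t htlen]
          _ = pvScan (c :: rest) := by rw [pvScan, hf]; simp only [hdrop]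

theorem pv_main : ∀ l : List Char, pvApply pvPats l = pvScan l := fun l =>
  pv_main_aux l.length l le_rfl

-- replace bridge: PySem's replace equals pvRepl when dst = src ++ pvIns ----

theorem pv_replace_go_eq (q : List Char) (hq : q ≠ []) :
    ∀ fuel l acc, l.length ≤ fuel →
      PySem.Chars.replace.go q (q ++ pvIns) fuel l acc = acc.reverse ++ pvRepl q l := by
  intro fuel
  induction fuel with
  | zero =>
    intro l acc hl
    have : l = [] := List.length_eq_zero_iff.mp (Nat.le_zero.mp hl)
    subst this
    rw [PySem.Chars.replace.go, pvRepl]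
  | succ fuel IH =>
    intro l acc hl
    cases l with
    | nil =>
      rw [PySem.Chars.replace.go, pvRepl]
      all_goals simp
    | cons c t =>
      obtain ⟨qc, q', hq'⟩ := List.exists_cons_of_ne_nil hq
      by_cases hm : q.isPrefixOf (c :: t) = true
      · rw [PySem.Chars.replace.go]
        simp only [hm, if_pos]
        have hdl : (List.drop q.length (c :: t)) = t.drop (q.length - 1) := by
          rw [hq']; simp
        have hlen : (List.drop q.length (c :: t)).length ≤ fuel := by
          simp only [List.length_drop, List.length_cons] at *
          have : 1 ≤ q.length := by rw [hq']; simp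
          omega
        rw [IH _ _ hlen, hdl]
        rw [show pvRepl q (c :: t) = (q ++ pvIns) ++ pvRepl q (t.drop (q.length - 1)) from by
          rw [pvRepl]; simp [hm]]
        simp
      · rw [PySem.Chars.replace.go]
        simp only [hm, if_neg, Bool.false_eq_true, not_false_iff]
        have hlen : t.length ≤ fuel := by simp only [List.length_cons] at hl; omega
        rw [IH _ _ hlen]
        rw [show pvRepl q (c :: t) = c :: pvRepl q t from by rw [pvRepl]; simp [hm]]
        simp

theorem pv_replace_eq (q : List Char) (hq : q ≠ []) (l : List Char) :
    PySem.Chars.replace l q (q ++ pvIns) = pvRepl q l := by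
  rw [PySem.Chars.replace, if_neg (by simp [hq])]
  simpa using pv_replace_go_eq q hq l.length l [] le_rfl

-- A's seven String-level replace passes, at the character level
theorem pv_portA_toList (s : String) :
    (pvReplacements.foldl (fun rewritten sd => PySem.Str.replace rewritten sd.1 sd.2) s).toList
      = pvApply pvPats s.toList := by
  have step : ∀ (o d : String) (x : String), d.toList = o.toList ++ pvIns → o.toList ≠ [] →
      (PySem.Str.replace x o d).toList = pvRepl o.toList x.toList := by
    intro o d x hd ho
    rw [PySem.Str.toList_replace, hd, pv_replace_eq _ ho]
  simp only [pvReplacements, List.foldl, pvApply, pvPats]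
  rw [step _ _ _ (by decide) (by decide), step _ _ _ (by decide) (by decide),
      step _ _ _ (by decide) (by decide), step _ _ _ (by decide) (by decide),
      step _ _ _ (by decide) (by decide), step _ _ _ (by decide) (by decide),
      step _ _ _ (by decide) (by decide)]

-- ===== VERDICT (by name: the statement is the Claim_ definition above) =====
theorem rewrite_html_for_proxy_py_spec : Claim_equal_rewrite_html_for_proxy_py := by
  intro s _
  unfold Spec_rewrite_html_for_proxy_py rewrite_html_for_proxy_py rewrite_html_for_proxy_py_alt
  by_cases hs : s = ""
  · simp [hs]
  · rw [if_neg hs, if_neg hs]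
    have h1 : (pvReplacements.foldl (fun rewritten sd => PySem.Str.replace rewritten sd.1 sd.2) s).toList
        = pvScan s.toList := by rw [pv_portA_toList, pv_main]
    calc pvReplacements.foldl (fun rewritten sd => PySem.Str.replace rewritten sd.1 sd.2) s
        = String.ofList ((pvReplacements.foldl (fun rewritten sd => PySem.Str.replace rewritten sd.1 sd.2) s).toList) := String.ofList_toList.symm
      _ = String.ofList (pvScan s.toList) := by rw [h1]
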